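-- pv_equiv track=rewrite | github.com/WCTech/Form2Email | GSheet.py | getSheetID
-- ===== SOURCE A (Python) =====
-- def getSheetID(url):
--     sheetid = ''
--     for x in range(0, len(url)):
--         if url[x:x + 3] == '/d/':
--             for y in range(x + 3, len(url)):
--                 if url[y] == '/':
--                     break
--                 else:
--                     sheetid += url[y]
--             break
--     return sheetid
-- ===== SOURCE B (Python) =====
-- def getSheetID(url):
--     i = url.find('/d/')
--     if i == -1:
--         return ''
--     rest = url[i + 3:]
--     j = rest.find('/')
--     return rest if j == -1 else rest[:j]
-- ===== Notes on version B (the rewrite author's own statement) =====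
-- stated objective: simpler
-- what changed: Replaces the hand-written sliding-window scan with nested char-accumulation loops by two str.find lookups plus slicing (find '/d/', slice the remainder, cut at the next '/').
import Mathlib
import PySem

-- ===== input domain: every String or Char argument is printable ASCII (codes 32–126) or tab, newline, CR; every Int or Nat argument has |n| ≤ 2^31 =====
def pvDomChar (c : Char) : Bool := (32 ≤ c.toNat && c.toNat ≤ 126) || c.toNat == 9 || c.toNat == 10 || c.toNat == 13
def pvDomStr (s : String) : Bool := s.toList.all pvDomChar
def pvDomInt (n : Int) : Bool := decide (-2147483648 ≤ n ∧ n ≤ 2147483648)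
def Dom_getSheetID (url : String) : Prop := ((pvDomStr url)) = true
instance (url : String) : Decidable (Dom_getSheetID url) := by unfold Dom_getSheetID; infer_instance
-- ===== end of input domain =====

-- B replaces A's hand-written sliding-window scan with nested accumulation loops by
-- two find lookups plus slicing (objective: simpler).

-- ===== PORT A =====
-- inner loop: 'for y in range(x+3, len(url)): if url[y] == "/": break else: sheetid += url[y]'
def pvInnerA (acc : List Char) : List Char → List Char
  | [] => acc
  | c :: t => if c = '/' then acc else pvInnerA (acc ++ [c]) t

-- outer loop: x over range(0, len(url)); the iteration at x sees the suffix url[x:],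
-- and url[x:x+3] == '/d/' is take 3 of that suffix (Python slices clamp, so this is exact).
def pvOuterA : List Char → List Char
  | [] => []
  | c :: t =>
      if List.take 3 (c :: t) = ['/', 'd', '/'] then pvInnerA [] (List.drop 3 (c :: t))
      else pvOuterA t

def getSheetID (url : String) : String := String.mk (pvOuterA url.toList)

-- ===== PORT B =====
def getSheetID_alt (url : String) : String :=
  let i := PySem.Chars.find url.toList ['/', 'd', '/']
  if i = -1 then ""
  else
    let rest := PySem.List.slice url.toList (some (i + 3)) none
    let j := PySem.Chars.find rest ['/']
    if j = -1 then String.mk rest else String.mk (PySem.List.slice rest none (some j))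

-- ===== PRECONDITION & SPEC =====
def Spec_getSheetID (url : String) (out : String) : Prop := out = getSheetID_alt url
instance (url : String) (out : String) : Decidable (Spec_getSheetID url out) := by unfold Spec_getSheetID; infer_instance

-- ===== CLAIM (what is proved, stated in full; the proofs are below) =====
def Claim_equal_getSheetID : Prop := ∀ (url : String), Dom_getSheetID url → Spec_getSheetID url (getSheetID url)

-- ===== LEMMAS AND PROOFS =====

-- A's inner loop appends takeWhile (≠ '/') to the accumulator.
theorem pvInnerA_eq (rest : List Char) : ∀ acc, pvInnerA acc rest = acc ++ rest.takeWhile (· ≠ '/') := by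
  induction rest with
  | nil => intro acc; simp [pvInnerA]
  | cons c t ih =>
      intro acc
      by_cases hc : c = '/'
      · simp [pvInnerA, hc, List.takeWhile]
      · simp [pvInnerA, hc, List.takeWhile, ih]

-- If '/d/' is nowhere an infix, A's outer loop never fires and returns ''.
theorem pvOuterA_none (cs : List Char) (h : ¬ ['/', 'd', '/'] <:+: cs) : pvOuterA cs = [] := by
  induction cs with
  | nil => rfl
  | cons c t ih =>
      have h3 : List.take 3 (c :: t) ≠ ['/', 'd', '/'] := by
        intro he
        exact h (List.IsPrefix.isInfix (he ▸ List.take_prefix 3 (c :: t)))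
      rw [pvOuterA, if_neg h3]
      exact ih (fun hi => h (hi.trans (List.suffix_cons c t).isInfix))

-- If '/d/' first occurs at position n, A's outer loop enters the inner loop on url[n+3:].
theorem pvOuterA_match : ∀ (cs : List Char) (n : Nat),
    ['/', 'd', '/'] <+: cs.drop n → (∀ i < n, ¬ ['/', 'd', '/'] <+: cs.drop i) →
    pvOuterA cs = pvInnerA [] (cs.drop (n + 3)) := by
  intro cs
  induction cs with
  | nil => intro n hp _; simp at hp
  | cons c t ih =>
      intro n hp hmin
      cases n with
      | zero =>
          have hp' : ['/', 'd', '/'] <+: (c :: t) := by simpa using hp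
          have h3 : List.take 3 (c :: t) = ['/', 'd', '/'] := by
            have := List.prefix_iff_eq_take.mp hp'
            simpa using this.symm
          rw [pvOuterA, if_pos h3]
      | succ m =>
          have h0 : ¬ ['/', 'd', '/'] <+: (c :: t) := by
            simpa using hmin 0 (Nat.succ_pos m)
          have h3 : List.take 3 (c :: t) ≠ ['/', 'd', '/'] := by
            intro he; exact h0 (he ▸ List.take_prefix 3 (c :: t))
          rw [pvOuterA, if_neg h3]
          have := ih m (by simpa using hp)
            (fun i hi => by simpa using hmin (i + 1) (Nat.succ_lt_succ hi))
          simpa using this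

-- takeWhile (≠ '/') cuts exactly at the first '/' position.
theorem takeWhile_eq_take (rest : List Char) : ∀ (j : Nat),
    ['/'] <+: rest.drop j → (∀ i < j, ¬ ['/'] <+: rest.drop i) →
    rest.takeWhile (· ≠ '/') = rest.take j := by
  induction rest with
  | nil => intro j hp _; simp at hp
  | cons c t ih =>
      intro j hp hmin
      cases j with
      | zero =>
          have hp' : ['/'] <+: (c :: t) := by simpa using hp
          rcases hp' with ⟨s, hs⟩
          simp at hs
          simp [List.takeWhile, hs.1.symm]
      | succ m =>
          have h0 : ¬ ['/'] <+: (c :: t) := by simpa using hmin 0 (Nat.succ_pos m)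
          have hc : c ≠ '/' := by
            intro he; exact h0 ⟨t, by simp [he]⟩
          have ht := ih m (by simpa using hp)
            (fun i hi => by simpa using hmin (i + 1) (Nat.succ_lt_succ hi))
          rw [List.takeWhile_cons, if_pos (by simp [hc]), ht]
          rfl

-- If '/' does not occur, takeWhile keeps everything.
theorem takeWhile_no_slash (rest : List Char) (h : ¬ ['/'] <:+: rest) :
    rest.takeWhile (· ≠ '/') = rest := by
  have hm : '/' ∉ rest := fun hm => h ((List.singleton_infix_iff _ _).mpr hm)
  induction rest with
  | nil => rfl
  | cons c t ih =>
      have hc : c ≠ '/' := fun he => hm (by simp [he])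
      have ht := ih (fun hi => h (hi.trans (List.suffix_cons c t).isInfix))
        (fun hmem => hm (List.mem_cons_of_mem c hmem))
      rw [List.takeWhile_cons, if_pos (by simp [hc]), ht]

-- ===== VERDICT (by name: the statement is the Claim_ definition above) =====
theorem getSheetID_spec : Claim_equal_getSheetID := by
  intro url _
  show getSheetID url = getSheetID_alt url
  unfold getSheetID getSheetID_alt
  simp only []
  by_cases h1 : PySem.Chars.find url.toList ['/', 'd', '/'] = -1
  · rw [if_pos h1, pvOuterA_none url.toList ((PySem.Chars.find_eq_neg_one_iff url.toList ['/', 'd', '/']).mp h1)]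
    rfl
  · rw [if_neg h1]
    have h0 : 0 ≤ PySem.Chars.find url.toList ['/', 'd', '/'] := by
      have := PySem.Chars.neg_one_le_find url.toList ['/', 'd', '/']
      omega
    obtain ⟨hpre, hmin⟩ := PySem.Chars.find_spec h0
    set n := (PySem.Chars.find url.toList ['/', 'd', '/']).toNat with hndef
    have hn : PySem.Chars.find url.toList ['/', 'd', '/'] = (n : Int) :=
      (Int.toNat_of_nonneg h0).symm
    have hslice : PySem.List.slice url.toList
        (some (PySem.Chars.find url.toList ['/', 'd', '/'] + 3)) none = url.toList.drop (n + 3) := by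
      rw [hn]
      have : ((n : Int) + 3) = ((n + 3 : Nat) : Int) := by push_cast; ring
      rw [this, PySem.List.slice_from_natCast]
    rw [hslice, pvOuterA_match url.toList n hpre hmin, pvInnerA_eq, List.nil_append]
    set rest := url.toList.drop (n + 3) with hrest
    by_cases h2 : PySem.Chars.find rest ['/'] = -1
    · rw [if_pos h2, takeWhile_no_slash rest ((PySem.Chars.find_eq_neg_one_iff rest ['/']).mp h2)]
    · rw [if_neg h2]
      have j0 : 0 ≤ PySem.Chars.find rest ['/'] := by
        have := PySem.Chars.neg_one_le_find rest ['/']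
        omega
      obtain ⟨hjpre, hjmin⟩ := PySem.Chars.find_spec j0
      have hj : PySem.Chars.find rest ['/'] = ((PySem.Chars.find rest ['/']).toNat : Int) :=
        (Int.toNat_of_nonneg j0).symm
      rw [takeWhile_eq_take rest (PySem.Chars.find rest ['/']).toNat hjpre hjmin]
      have hmax : (((PySem.Chars.find rest ['/']).toNat : Int)).toNat
          = (PySem.Chars.find rest ['/']).toNat := by omega
      rw [hj, PySem.List.slice_to_natCast, hmax]
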